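-- pv_equiv track=rewrite | github.com/zoulala/exercise | image/image_axis_mark/image_test.py | yx_xy_norm
-- ===== SOURCE A (Python) =====
-- def yx_xy_norm(axes_y_to_x):
--     axes_xy = []
--     for y in axes_y_to_x:
--         for x in axes_y_to_x[y]:
--             axes_xy.append((x, y))
--     axes_sort = sorted(axes_xy, key=lambda x: x[0])
--
--     x_axes = [x for x, y in axes_sort]
--     x_set = sorted(set(x_axes))
--
--     axes_tuple = [(x_set.index(x) + 1, y) for x, y in axes_sort]
--     return axes_tuple
-- ===== SOURCE B (Python) =====
-- def yx_xy_norm(axes_y_to_x):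
--     pairs = sorted(((x, y) for y in axes_y_to_x for x in axes_y_to_x[y]),
--                    key=lambda p: p[0])
--     out = []
--     rank = 0
--     prev = None
--     for x, y in pairs:
--         if rank == 0 or x != prev:
--             rank += 1
--             prev = x
--         out.append((rank, y))
--     return out
-- ===== Notes on version B (the rewrite author's own statement) =====
-- stated objective: faster
-- what changed: Replaces the sorted-set index table and the per-element x_set.index scan with a single pass over the sorted pairs that maintains an incrementing rank and the previous x value.
import Mathlib
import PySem

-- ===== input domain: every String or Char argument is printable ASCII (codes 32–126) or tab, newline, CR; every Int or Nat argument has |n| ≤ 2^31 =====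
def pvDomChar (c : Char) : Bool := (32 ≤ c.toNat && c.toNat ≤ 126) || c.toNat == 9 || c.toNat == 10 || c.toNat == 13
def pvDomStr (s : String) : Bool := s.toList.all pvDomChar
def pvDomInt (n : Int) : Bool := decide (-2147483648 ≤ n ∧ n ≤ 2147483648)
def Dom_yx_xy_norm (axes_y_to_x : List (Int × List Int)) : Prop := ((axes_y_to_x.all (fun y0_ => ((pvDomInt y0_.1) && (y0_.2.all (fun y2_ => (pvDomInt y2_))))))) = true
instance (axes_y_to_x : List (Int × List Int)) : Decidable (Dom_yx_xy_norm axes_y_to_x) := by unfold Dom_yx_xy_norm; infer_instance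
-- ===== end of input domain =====

-- B replaces A's sorted-set index table (a linear x_set.index scan per element) with one
-- rank/prev pass over the sorted pairs; same return value everywhere.

-- ===== PORT A =====
def yx_xy_norm (axes_y_to_x : List (Int × List Int)) : List (Int × Int) :=
  let d := PySem.Dict.ofList axes_y_to_x
  let axes_xy := d.keys.foldl (fun acc y => acc ++ (d.getD y []).map (fun x => (x, y))) []
  let axes_sort := PySem.List.sorted axes_xy (fun p => p.1) false
  let x_axes := axes_sort.map (fun p => p.1)
  let x_set := PySem.List.sorted (PySem.Set.ofList x_axes) (fun x => x) false
  -- x is always a member of x_set, so Python's .index never raises; getD 0 is unreachable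
  axes_sort.map (fun p => ((((PySem.List.index? x_set p.1).getD 0 : Nat) : Int) + 1, p.2))

-- ===== PORT B =====
-- prev starts at 0 standing for Python's None: the 'rank == 0' disjunct guards the first
-- iteration exactly as in Source B, so the initial prev value is never compared meaningfully.
def yx_xy_norm_alt (axes_y_to_x : List (Int × List Int)) : List (Int × Int) :=
  let d := PySem.Dict.ofList axes_y_to_x
  let pairs := PySem.List.sorted
      (d.keys.foldl (fun acc y => acc ++ (d.getD y []).map (fun x => (x, y))) [])
      (fun p => p.1) false
  (pairs.foldl
    (fun (st : List (Int × Int) × Int × Int) p =>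
      if st.2.1 = 0 ∨ p.1 ≠ st.2.2 then
        (st.1 ++ [(st.2.1 + 1, p.2)], st.2.1 + 1, p.1)
      else
        (st.1 ++ [(st.2.1, p.2)], st.2.1, st.2.2))
    ([], 0, 0)).1

-- ===== PRECONDITION & SPEC =====
def Spec_yx_xy_norm (axes_y_to_x : List (Int × List Int)) (out : List (Int × Int)) : Prop := out = yx_xy_norm_alt axes_y_to_x
instance (axes_y_to_x : List (Int × List Int)) (out : List (Int × Int)) : Decidable (Spec_yx_xy_norm axes_y_to_x out) := by unfold Spec_yx_xy_norm; infer_instance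

-- ===== CLAIM (what is proved, stated in full; the proofs are below) =====
def Claim_equal_yx_xy_norm : Prop := ∀ (axes_y_to_x : List (Int × List Int)), Dom_yx_xy_norm axes_y_to_x → Spec_yx_xy_norm axes_y_to_x (yx_xy_norm axes_y_to_x)

-- ===== LEMMAS AND PROOFS =====

-- In a strictly increasing list, the index of a member is the number of smaller elements.
theorem pv_index_eq_countP (X : List Int) (x : Int)
    (hX : X.Pairwise (· < ·)) (hx : x ∈ X) :
    PySem.List.index? X x = some (X.countP (fun v => decide (v < x))) := by
  induction X with
  | nil => cases hx
  | cons h t ih =>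
    rcases List.pairwise_cons.1 hX with ⟨hht, ht⟩
    by_cases hhx : h = x
    · subst hhx
      have h0 : t.countP (fun v => decide (v < h)) = 0 := by
        rw [List.countP_eq_zero]
        intro a ha
        simp only [decide_eq_true_eq]
        exact not_lt.2 (le_of_lt (hht a ha))
      simp [PySem.List.index?, List.idxOf?_cons, h0]
    · have hxt : x ∈ t := by
        rcases List.mem_cons.1 hx with hx | hx
        · exact absurd hx.symm hhx
        · exact hx
      have hhl : h < x := hht x hxt
      have hrec := ih ht hxt
      rw [PySem.List.index?] at hrec ⊢
      simp [List.idxOf?_cons, hhx, hrec, hhl, Nat.add_comm]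

-- Counting '< b' vs '< a' when a ∈ X, a < b, and X has no element strictly between a and b.
theorem pv_countP_step (X : List Int) (a b : Int)
    (hX : X.Pairwise (· < ·)) (ha : a ∈ X) (hab : a < b)
    (hno : ∀ v ∈ X, ¬(a < v ∧ v < b)) :
    X.countP (fun v => decide (v < b)) = X.countP (fun v => decide (v < a)) + 1 := by
  induction X with
  | nil => cases ha
  | cons h t ih =>
    rcases List.pairwise_cons.1 hX with ⟨hht, ht⟩
    by_cases hha : h = a
    · subst hha
      have h1 : t.countP (fun v => decide (v < h)) = 0 := by
        rw [List.countP_eq_zero]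
        intro v hv
        simp only [decide_eq_true_eq]
        exact not_lt.2 (le_of_lt (hht v hv))
      have h2 : t.countP (fun v => decide (v < b)) = 0 := by
        rw [List.countP_eq_zero]
        intro v hv
        simp only [decide_eq_true_eq]
        intro hvb
        exact hno v (List.mem_cons_of_mem _ hv) ⟨hht v hv, hvb⟩
      simp [h1, h2, hab]
    · have hat : a ∈ t := by
        rcases List.mem_cons.1 ha with ha | ha
        · exact absurd ha.symm hha
        · exact ha
      have hhlta : h < a := hht a hat
      have hhltb : h < b := lt_trans hhlta hab
      have hrec := ih ht hat (fun v hv => hno v (List.mem_cons_of_mem _ hv))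
      simp [hhlta, hhltb]
      omega

-- The scan invariant: with rank = (#X-values < prev) + 1, prev ∈ X, remaining pairs sorted,
-- all ≥ prev, their x's in X, and every X-value above prev still to come, the fold emits ranks
-- equal to A's index-based ranks.
theorem pv_scan_eq (X : List Int) (hX : X.Pairwise (· < ·)) :
    ∀ (s : List (Int × Int)) (out : List (Int × Int)) (prev : Int),
      s.Pairwise (fun p q => p.1 ≤ q.1) →
      (∀ p ∈ s, prev ≤ p.1) →
      prev ∈ X →
      (∀ p ∈ s, p.1 ∈ X) →
      (∀ v ∈ X, prev < v → ∃ p ∈ s, p.1 = v) →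
      (s.foldl
        (fun (st : List (Int × Int) × Int × Int) p =>
          if st.2.1 = 0 ∨ p.1 ≠ st.2.2 then
            (st.1 ++ [(st.2.1 + 1, p.2)], st.2.1 + 1, p.1)
          else
            (st.1 ++ [(st.2.1, p.2)], st.2.1, st.2.2))
        (out, ((X.countP (fun v => decide (v < prev)) : Nat) : Int) + 1, prev)).1
      = out ++ s.map (fun p => (((X.countP (fun v => decide (v < p.1)) : Nat) : Int) + 1, p.2)) := by
  intro s
  induction s with
  | nil => intro out prev _ _ _ _ _; simp
  | cons p rest ih =>
    intro out prev hsort hge hprev hmem hcover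
    rcases List.pairwise_cons.1 hsort with ⟨hhd, htl⟩
    have hple : prev ≤ p.1 := hge p (List.mem_cons_self ..)
    by_cases heq : p.1 = prev
    · -- same x: rank unchanged
      have hcond : ¬(((X.countP (fun v => decide (v < prev)) : Nat) : Int) + 1 = 0 ∨ p.1 ≠ prev) := by
        rintro (h | h)
        · omega
        · exact h heq
      rw [List.foldl_cons, if_neg hcond]
      have hrec := ih (out ++ [(((X.countP (fun v => decide (v < prev)) : Nat) : Int) + 1, p.2)]) prev htl
        (fun q hq => le_trans hple (hhd q hq)) hprev
        (fun q hq => hmem q (List.mem_cons_of_mem _ hq))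
        (by
          intro v hv hlt
          rcases hcover v hv hlt with ⟨q, hq, hq1⟩
          rcases List.mem_cons.1 hq with hq | hq
          · subst hq; rw [heq] at hq1; omega
          · exact ⟨q, hq, hq1⟩)
      dsimp only at hrec ⊢
      rw [hrec]
      simp [heq]
    · -- new x: prev < p.1, rank increments
      have hlt : prev < p.1 := lt_of_le_of_ne hple (fun e => heq e.symm)
      have hpX : p.1 ∈ X := hmem p (List.mem_cons_self ..)
      have hno : ∀ v ∈ X, ¬(prev < v ∧ v < p.1) := by
        intro v hv hval
        rcases hcover v hv hval.1 with ⟨q, hq, hq1⟩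
        rcases List.mem_cons.1 hq with hq | hq
        · subst hq; omega
        · have := hhd q hq; omega
      have hstep : X.countP (fun v => decide (v < p.1)) = X.countP (fun v => decide (v < prev)) + 1 :=
        pv_countP_step X prev p.1 hX hprev hlt hno
      rw [List.foldl_cons, if_pos (Or.inr heq)]
      have hrec := ih (out ++ [(((X.countP (fun v => decide (v < prev)) : Nat) : Int) + 1 + 1, p.2)]) p.1 htl
        hhd hpX
        (fun q hq => hmem q (List.mem_cons_of_mem _ hq))
        (by
          intro v hv hvlt
          rcases hcover v hv (lt_trans hlt hvlt) with ⟨q, hq, hq1⟩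
          rcases List.mem_cons.1 hq with hq | hq
          · subst hq; omega
          · exact ⟨q, hq, hq1⟩)
      have hrank : ((X.countP (fun v => decide (v < p.1)) : Nat) : Int) + 1
          = ((X.countP (fun v => decide (v < prev)) : Nat) : Int) + 1 + 1 := by
        rw [hstep]; push_cast; ring
      dsimp only
      rw [hrank] at hrec
      rw [hrec]
      simp [hrank]

-- Abstract form of the equivalence: over any x-sorted pair list s whose distinct x-values
-- are exactly the strictly increasing list X, A's index-ranking equals B's scan.
theorem pv_mid (s : List (Int × Int)) (X : List Int)
    (hXlt : X.Pairwise (· < ·))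
    (hmemX : ∀ v, v ∈ X ↔ v ∈ s.map (fun p => p.1))
    (hsorted : s.Pairwise (fun p q => p.1 ≤ q.1)) :
    s.map (fun p => ((((PySem.List.index? X p.1).getD 0 : Nat) : Int) + 1, p.2))
    = (s.foldl
        (fun (st : List (Int × Int) × Int × Int) p =>
          if st.2.1 = 0 ∨ p.1 ≠ st.2.2 then
            (st.1 ++ [(st.2.1 + 1, p.2)], st.2.1 + 1, p.1)
          else
            (st.1 ++ [(st.2.1, p.2)], st.2.1, st.2.2))
        ([], 0, 0)).1 := by
  have hA : s.map (fun p => ((((PySem.List.index? X p.1).getD 0 : Nat) : Int) + 1, p.2))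
      = s.map (fun p => (((X.countP (fun v => decide (v < p.1)) : Nat) : Int) + 1, p.2)) := by
    apply List.map_congr_left
    intro p hp
    rw [pv_index_eq_countP X p.1 hXlt ((hmemX p.1).2 (List.mem_map_of_mem hp))]
    rfl
  rw [hA]
  cases s with
  | nil => simp
  | cons p0 rest =>
    rcases List.pairwise_cons.1 hsorted with ⟨hhd, htl⟩
    have hmin : ∀ q ∈ p0 :: rest, p0.1 ≤ q.1 := by
      intro q hq
      rcases List.mem_cons.1 hq with hq | hq
      · exact hq ▸ le_refl _
      · exact hhd q hq
    have h0 : X.countP (fun v => decide (v < p0.1)) = 0 := by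
      rw [List.countP_eq_zero]
      intro v hv
      simp only [decide_eq_true_eq]
      rcases List.mem_map.1 ((hmemX v).1 hv) with ⟨q, hq, rfl⟩
      exact not_lt.2 (hmin q hq)
    have hp0X : p0.1 ∈ X := (hmemX p0.1).2 (List.mem_map_of_mem (List.mem_cons_self ..))
    rw [List.foldl_cons, if_pos (Or.inl rfl)]
    dsimp only
    have hrec := pv_scan_eq X hXlt rest [((0 : Int) + 1, p0.2)] p0.1 htl hhd hp0X
      (fun q hq => (hmemX q.1).2 (List.mem_map_of_mem (List.mem_cons_of_mem _ hq)))
      (by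
        intro v hv hvlt
        rcases List.mem_map.1 ((hmemX v).1 hv) with ⟨q, hq, rfl⟩
        rcases List.mem_cons.1 hq with hq | hq
        · exact absurd (hq ▸ rfl : q.1 = p0.1) (by intro e; rw [e] at hvlt; exact lt_irrefl _ hvlt)
        · exact ⟨q, hq, rfl⟩)
    have hinit : ((X.countP (fun v => decide (v < p0.1)) : Nat) : Int) + 1 = (0 : Int) + 1 := by
      rw [h0]; rfl
    rw [hinit] at hrec
    simp only [List.nil_append]
    rw [hrec]
    simp [h0]

-- Instantiation: s is the sorted flatten, X is sorted(set(x-values of s)).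
theorem pv_top (flat : List (Int × Int)) :
    (PySem.List.sorted flat (fun p => p.1) false).map
      (fun p => ((((PySem.List.index?
          (PySem.List.sorted
            (PySem.Set.ofList ((PySem.List.sorted flat (fun p => p.1) false).map (fun p => p.1)))
            (fun x => x) false) p.1).getD 0 : Nat) : Int) + 1, p.2))
    = ((PySem.List.sorted flat (fun p => p.1) false).foldl
        (fun (st : List (Int × Int) × Int × Int) p =>
          if st.2.1 = 0 ∨ p.1 ≠ st.2.2 then
            (st.1 ++ [(st.2.1 + 1, p.2)], st.2.1 + 1, p.1)
          else
            (st.1 ++ [(st.2.1, p.2)], st.2.1, st.2.2))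
        ([], 0, 0)).1 := by
  apply pv_mid
  · exact PySem.List.sorted_ofList_pairwise_lt _
  · intro v
    rw [PySem.List.mem_sorted, PySem.Set.mem_ofList]
  · exact PySem.List.sorted_pairwise flat _

-- ===== VERDICT (by name: the statement is the Claim_ definition above) =====
theorem yx_xy_norm_spec : Claim_equal_yx_xy_norm := by
  intro l _
  unfold Spec_yx_xy_norm yx_xy_norm yx_xy_norm_alt
  exact pv_top _
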